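-- pv_equiv track=rewrite | github.com/Vineyardcode/voynich_slop | scripts/slot_analysis.py | decompose_word
-- ===== SOURCE A (Python) =====
-- SLOT_TOKENS = {
--     0:  ["q", "d", "s"],
--     1:  ["y", "o"],
--     2:  ["l", "r"],
--     3:  ["f", "p", "k", "t"],
--     4:  ["ckh", "cth", "cph", "cfh", "sch", "sh", "ch"],  # longest first
--     5:  ["eee", "ee", "e"],
--     6:  ["d", "s"],
--     7:  ["a", "o"],
--     # slot 8 is rare/empty in most words
--     9:  ["iii", "ii", "i"],
--     10: ["iin", "in", "n", "m", "d", "l", "r"],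
--     11: ["y"],
-- }
--
-- def decompose_word(word):
--     """
--     Decompose an EVA word into its slot components.
--     Returns a dict: {slot_number: matched_token, ...} and the remainder.
--
--     Uses greedy left-to-right matching following slot order.
--     """
--     slots = {}
--     pos = 0
--     remainder = ""
--
--     # Try each slot in order
--     for slot_num in sorted(SLOT_TOKENS.keys()):
--         if pos >= len(word):
--             break
--         matched = False
--         for token in SLOT_TOKENS[slot_num]:
--             if word[pos:].startswith(token):
--                 slots[slot_num] = token
--                 pos += len(token)
--                 matched = True
--                 break
--         # If slot didn't match, skip it (slot is optional)
--
--     if pos < len(word):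
--         remainder = word[pos:]
--
--     return slots, remainder
-- ===== SOURCE B (Python) =====
-- SLOT_TOKENS = {
--     0:  ["q", "d", "s"],
--     1:  ["y", "o"],
--     2:  ["l", "r"],
--     3:  ["f", "p", "k", "t"],
--     4:  ["ckh", "cth", "cph", "cfh", "sch", "sh", "ch"],
--     5:  ["eee", "ee", "e"],
--     6:  ["d", "s"],
--     7:  ["a", "o"],
--     9:  ["iii", "ii", "i"],
--     10: ["iin", "in", "n", "m", "d", "l", "r"],
--     11: ["y"],
-- }
--
-- _SLOTS = sorted(SLOT_TOKENS.items())
--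
-- def decompose_word(word):
--     """Recursive suffix-consuming decomposition: walk the slot table once,
--     stripping the first matching token off the front of the remaining string."""
--     def go(table, rest):
--         if not table:
--             return {}, rest
--         num, tokens = table[0]
--         tok = next((t for t in tokens if rest.startswith(t)), None)
--         if tok is None:
--             return go(table[1:], rest)
--         tail, rem = go(table[1:], rest[len(tok):])
--         return {num: tok, **tail}, rem
--     return go(_SLOTS, word)
-- ===== Notes on version B (the rewrite author's own statement) =====
-- stated objective: simpler
-- what changed: Replaces A's imperative nested loops with a position counter, matched flag, break and dict mutation by a single structural recursion over the sorted slot table that strips the first matching token off the front of the remaining suffix string.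
import Mathlib
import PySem

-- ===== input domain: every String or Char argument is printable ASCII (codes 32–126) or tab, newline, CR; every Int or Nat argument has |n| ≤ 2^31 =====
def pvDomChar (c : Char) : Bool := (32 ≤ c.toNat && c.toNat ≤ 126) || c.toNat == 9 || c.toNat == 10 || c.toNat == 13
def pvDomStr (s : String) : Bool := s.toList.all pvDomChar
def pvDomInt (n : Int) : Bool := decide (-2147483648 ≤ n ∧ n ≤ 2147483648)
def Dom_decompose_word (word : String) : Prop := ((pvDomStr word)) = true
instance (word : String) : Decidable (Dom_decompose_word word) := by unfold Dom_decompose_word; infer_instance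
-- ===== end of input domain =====

-- B replaces A's index-based nested greedy loops (position counter, matched flag, break) by a
-- single recursion over the slot table that strips matched tokens off the front of the remaining
-- suffix string; objective: simpler (return values only; neither version mutates its input).

-- the shared module constant SLOT_TOKENS, in sorted key order (as both versions traverse it)
def SLOT_TOKENS_sorted : List (Int × List String) :=
  [(0, ["q", "d", "s"]),
   (1, ["y", "o"]),
   (2, ["l", "r"]),
   (3, ["f", "p", "k", "t"]),
   (4, ["ckh", "cth", "cph", "cfh", "sch", "sh", "ch"]),
   (5, ["eee", "ee", "e"]),
   (6, ["d", "s"]),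
   (7, ["a", "o"]),
   (9, ["iii", "ii", "i"]),
   (10, ["iin", "in", "n", "m", "d", "l", "r"]),
   (11, ["y"])]

-- ===== PORT A =====
-- A's inner `for token in …: if word[pos:].startswith(token): …; break` loop
def aTokenScan (s : String) : List String → Option String
  | [] => none
  | t :: ts => if PySem.Str.startswith s t then some t else aTokenScan s ts

-- A's outer `for slot_num in sorted(SLOT_TOKENS.keys())` loop over state (slots, pos);
-- `if pos >= len(word): break` exits the loop
def aSlotLoop (word : String) :
    List (Int × List String) → PySem.Dict Int String → Int → PySem.Dict Int String × Int
  | [], slots, pos => (slots, pos)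
  | (n, toks) :: rest, slots, pos =>
    if pos ≥ (PySem.Str.len word : Int) then (slots, pos)
    else
      match aTokenScan (PySem.Str.slice word (some pos) none) toks with
      | none => aSlotLoop word rest slots pos
      | some t => aSlotLoop word rest (slots.insert n t) (pos + (PySem.Str.len t : Int))

def decompose_word (word : String) : (List (Int × String)) × String :=
  let (slots, pos) := aSlotLoop word SLOT_TOKENS_sorted PySem.Dict.empty 0
  let remainder : String :=
    if pos < (PySem.Str.len word : Int) then PySem.Str.slice word (some pos) none else ""
  (slots.items, remainder)

-- ===== PORT B =====
-- B's recursive `go(table, rest)`: `next((t for t in tokens if rest.startswith(t)), None)` is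
-- List.find?, `rest[len(tok):]` strips the matched token, `{num: tok, **tail}` is cons
def bGo : List (Int × List String) → String → (List (Int × String)) × String
  | [], rest => ([], rest)
  | (n, toks) :: tl, rest =>
    match toks.find? (fun t => PySem.Str.startswith rest t) with
    | none => bGo tl rest
    | some t =>
      let (tail, rem) := bGo tl (PySem.Str.slice rest (some (PySem.Str.len t : Int)) none)
      ((n, t) :: tail, rem)

def decompose_word_alt (word : String) : (List (Int × String)) × String :=
  bGo SLOT_TOKENS_sorted word

-- ===== PRECONDITION & SPEC =====
def Spec_decompose_word (word : String) (out : (List (Int × String)) × String) : Prop := out = decompose_word_alt word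
instance (word : String) (out : (List (Int × String)) × String) : Decidable (Spec_decompose_word word out) := by unfold Spec_decompose_word; infer_instance

-- ===== CLAIM (what is proved, stated in full; the proofs are below) =====
def Claim_equal_decompose_word : Prop := ∀ (word : String), Dom_decompose_word word → Spec_decompose_word word (decompose_word word)

-- ===== LEMMAS AND PROOFS =====

theorem str_eq_ofList {s : String} {l : List Char} (h : s.toList = l) : s = String.ofList l := by
  rw [← h, String.ofList_toList]

theorem slice_from_nat (s : String) (k : Nat) :
    PySem.Str.slice s (some (k : Int)) none = String.ofList (s.toList.drop k) := by
  apply str_eq_ofList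
  simp [pysem]

theorem aTokenScan_eq_find? (s : String) (ts : List String) :
    aTokenScan s ts = ts.find? (fun t => PySem.Str.startswith s t) := by
  induction ts with
  | nil => rfl
  | cons t ts ih =>
    rw [List.find?_cons]
    cases h : PySem.Str.startswith s t <;> simp only [aTokenScan, h, ih] <;> rfl

theorem startswith_ofList_prefix {l : List Char} {t : String}
    (h : PySem.Str.startswith (String.ofList l) t = true) : t.toList <+: l := by
  simpa [pysem, PySem.Chars.startswith_iff] using h

theorem find?_empty_rest (ts : List String) (h : ∀ t ∈ ts, t.toList ≠ []) :
    ts.find? (fun t => PySem.Str.startswith (String.ofList []) t) = none := by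
  rw [List.find?_eq_none]
  intro t ht hs
  exact h t ht (List.prefix_nil.mp (startswith_ofList_prefix hs))

theorem bGo_cons_none {n : Int} {toks : List String} {tl : List (Int × List String)} {rest : String}
    (h : toks.find? (fun t => PySem.Str.startswith rest t) = none) :
    bGo ((n, toks) :: tl) rest = bGo tl rest := by
  simp only [bGo, h]

theorem bGo_cons_some {n : Int} {toks : List String} {tl : List (Int × List String)}
    {rest : String} {t : String}
    (h : toks.find? (fun t => PySem.Str.startswith rest t) = some t) :
    bGo ((n, toks) :: tl) rest
      = ((n, t) :: (bGo tl (PySem.Str.slice rest (some (PySem.Str.len t : Int)) none)).1,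
         (bGo tl (PySem.Str.slice rest (some (PySem.Str.len t : Int)) none)).2) := by
  simp only [bGo, h]

theorem bGo_empty (table : List (Int × List String))
    (h : ∀ p ∈ table, ∀ t ∈ p.2, t.toList ≠ []) :
    bGo table (String.ofList []) = ([], String.ofList []) := by
  induction table with
  | nil => rfl
  | cons p tl ih =>
    obtain ⟨n, toks⟩ := p
    rw [bGo_cons_none (find?_empty_rest _ (fun t ht => h (n, toks) (by simp) t ht))]
    exact ih (fun p hp => h p (by simp [hp]))

theorem aSlotLoop_cons_ge {word : String} {n : Int} {toks : List String}
    {tl : List (Int × List String)} {slots : PySem.Dict Int String} {pos : Int}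
    (h : pos ≥ (PySem.Str.len word : Int)) :
    aSlotLoop word ((n, toks) :: tl) slots pos = (slots, pos) := by
  simp only [aSlotLoop, if_pos h]

theorem aSlotLoop_cons_none {word : String} {n : Int} {toks : List String}
    {tl : List (Int × List String)} {slots : PySem.Dict Int String} {pos : Int}
    (h : ¬ pos ≥ (PySem.Str.len word : Int))
    (h2 : aTokenScan (PySem.Str.slice word (some pos) none) toks = none) :
    aSlotLoop word ((n, toks) :: tl) slots pos = aSlotLoop word tl slots pos := by
  simp only [aSlotLoop, if_neg h, h2]

theorem aSlotLoop_cons_some {word : String} {n : Int} {toks : List String}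
    {tl : List (Int × List String)} {slots : PySem.Dict Int String} {pos : Int} {t : String}
    (h : ¬ pos ≥ (PySem.Str.len word : Int))
    (h2 : aTokenScan (PySem.Str.slice word (some pos) none) toks = some t) :
    aSlotLoop word ((n, toks) :: tl) slots pos
      = aSlotLoop word tl (slots.insert n t) (pos + (PySem.Str.len t : Int)) := by
  simp only [aSlotLoop, if_neg h, h2]

theorem len_eq_toList_length (s : String) : (PySem.Str.len s : Int) = (s.toList.length : Int) := by
  simp [pysem]

theorem decompose_word_key (word : String) (table : List (Int × List String)) :
    ∀ (slots : PySem.Dict Int String) (k : Nat),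
      (∀ p ∈ table, ∀ t ∈ p.2, t.toList ≠ []) →
      (table.map Prod.fst).Nodup →
      (∀ n ∈ table.map Prod.fst, slots.contains n = false) →
      k ≤ word.toList.length →
      ∃ k' : Nat, k ≤ k' ∧ k' ≤ word.toList.length ∧
        (aSlotLoop word table slots (k : Int)).1.items
          = slots.items ++ (bGo table (String.ofList (word.toList.drop k))).1 ∧
        (aSlotLoop word table slots (k : Int)).2 = (k' : Int) ∧
        (bGo table (String.ofList (word.toList.drop k))).2
          = String.ofList (word.toList.drop k') := by
  induction table with
  | nil =>
    intro slots k _ _ _ hk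
    exact ⟨k, le_refl _, hk, by simp [aSlotLoop, bGo], rfl, rfl⟩
  | cons p tl ih =>
    obtain ⟨n, toks⟩ := p
    intro slots k hne hnd hfresh hk
    have hlenw : (PySem.Str.len word : Int) = (word.toList.length : Int) :=
      len_eq_toList_length word
    by_cases hbreak : (k : Int) ≥ (PySem.Str.len word : Int)
    · -- pos >= len(word): A breaks; B matches nothing against the empty suffix
      have hkl : k = word.toList.length := by rw [hlenw] at hbreak; omega
      have hdrop : word.toList.drop k = [] := by rw [hkl]; simp
      have hb := bGo_empty ((n, toks) :: tl) hne
      refine ⟨k, le_refl _, hk, ?_, ?_, ?_⟩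
      · rw [aSlotLoop_cons_ge hbreak, hdrop, hb]; simp
      · rw [aSlotLoop_cons_ge hbreak]
      · rw [hdrop, hb]
    · have hklt : k < word.toList.length := by rw [hlenw] at hbreak; omega
      have hsl : PySem.Str.slice word (some (k : Int)) none
          = String.ofList (word.toList.drop k) := slice_from_nat word k
      cases hfind : toks.find? (fun t => PySem.Str.startswith (String.ofList (word.toList.drop k)) t) with
      | none =>
        have hfind' : aTokenScan (PySem.Str.slice word (some (k : Int)) none) toks = none := by
          rw [aTokenScan_eq_find?, hsl, hfind]
        obtain ⟨k', h1, h2, h3, h4, h5⟩ := ih slots k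
          (fun p hp => hne p (by simp [hp])) (by simpa using hnd.tail)
          (fun m hm => hfresh m (by simp [hm])) hk
        rw [aSlotLoop_cons_none hbreak hfind', bGo_cons_none hfind]
        exact ⟨k', h1, h2, h3, h4, h5⟩
      | some t =>
        have hfind' : aTokenScan (PySem.Str.slice word (some (k : Int)) none) toks = some t := by
          rw [aTokenScan_eq_find?, hsl, hfind]
        have hpre : t.toList <+: word.toList.drop k :=
          startswith_ofList_prefix (List.find?_some hfind)
        have htlen : k + t.toList.length ≤ word.toList.length := by
          have h := hpre.length_le
          simp only [List.length_drop] at h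
          omega
        have hcast : (k : Int) + (PySem.Str.len t : Int) = ((k + t.toList.length : Nat) : Int) := by
          rw [len_eq_toList_length]; push_cast; ring
        have hsl2 : PySem.Str.slice (String.ofList (word.toList.drop k))
              (some (PySem.Str.len t : Int)) none
            = String.ofList (word.toList.drop (k + t.toList.length)) := by
          have : (PySem.Str.len t : Int) = ((t.toList.length : Nat) : Int) := len_eq_toList_length t
          rw [this, slice_from_nat]
          rw [String.toList_ofList, List.drop_drop]
        have hndt : (tl.map Prod.fst).Nodup := by simpa using hnd.tail
        have hnmem : n ∉ tl.map Prod.fst := by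
          have h := hnd
          simp only [List.map_cons, List.nodup_cons] at h
          exact h.1
        obtain ⟨k', h1, h2, h3, h4, h5⟩ := ih (slots.insert n t) (k + t.toList.length)
          (fun p hp => hne p (by simp [hp])) hndt
          (fun m hm => by
            rw [PySem.Dict.contains_insert]
            have hmn : (m == n) = false := by
              simp only [beq_eq_false_iff_ne]
              intro hEq; exact hnmem (hEq ▸ hm)
            simp [hmn, hfresh m (by simp [hm])])
          htlen
        have hins : (slots.insert n t).items = slots.items ++ [(n, t)] :=
          PySem.Dict.items_insert_of_not_contains slots t (hfresh n (by simp))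
        rw [aSlotLoop_cons_some hbreak hfind', bGo_cons_some hfind, hcast, hsl2]
        refine ⟨k', by omega, h2, ?_, h4, h5⟩
        rw [h3, hins]
        simp

-- ===== VERDICT (by name: the statement is the Claim_ definition above) =====
theorem decompose_word_spec : Claim_equal_decompose_word := by
  intro word _
  unfold Spec_decompose_word decompose_word decompose_word_alt
  obtain ⟨k', hk1, hk2, h3, h4, h5⟩ :=
    decompose_word_key word SLOT_TOKENS_sorted PySem.Dict.empty 0
      (by decide) (by decide) (fun n _ => by simp [pysem]) (Nat.zero_le _)
  have hw : String.ofList (word.toList.drop 0) = word := by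
    rw [List.drop_zero, String.ofList_toList]
  rw [hw] at h3 h5
  rw [Nat.cast_zero] at h3 h4
  rcases hA : aSlotLoop word SLOT_TOKENS_sorted PySem.Dict.empty 0 with ⟨s, p⟩
  rw [hA] at h3 h4
  rcases hB : bGo SLOT_TOKENS_sorted word with ⟨d, rem⟩
  rw [hB] at h3 h5
  dsimp only at h3 h4 h5
  show (s.items, if p < (PySem.Str.len word : Int) then PySem.Str.slice word (some p) none else "")
      = (d, rem)
  rw [Prod.mk.injEq]
  refine ⟨by simpa [pysem] using h3, ?_⟩
  rw [h4, h5, len_eq_toList_length]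
  by_cases hlt : k' < word.toList.length
  · rw [if_pos (by exact_mod_cast hlt), slice_from_nat]
  · have hkl : k' = word.toList.length := by omega
    rw [if_neg (by omega), hkl]
    simp
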